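-- pv_equiv track=rewrite | github.com/pavel-alt/Pasha3 | algoritm.py | list_clear
-- ===== SOURCE A (Python) =====
-- def list_clear(arr):
--     left = []
--     right = []
--     for i in range(len(arr)):
--         for j in range(len(arr)):
--             if arr[i] > arr[j]:
--                 left.append(arr[j])
--             if arr[i] < arr[j]:
--                 right.append(arr[j])
--             if arr[i] == arr[j] and i > j:
--                 left.append(arr[j])
--             if arr[i] == arr[j] and i < j:
--                 right.append(arr[j])
--
--         if len(left) == len(right):
--             return arr[i]
--         left.clear()
--         right.clear()
-- ===== SOURCE B (Python) =====
-- def list_clear(arr):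
--     if len(arr) % 2 == 0:
--         return None
--     k = len(arr) // 2
--     xs = arr
--     while True:
--         pivot = xs[len(xs) // 2]
--         lt = [x for x in xs if x < pivot]
--         if k < len(lt):
--             xs = lt
--             continue
--         eq = xs.count(pivot)
--         if k < len(lt) + eq:
--             return pivot
--         k -= len(lt) + eq
--         xs = [x for x in xs if x > pivot]
-- ===== Notes on version B (the rewrite author's own statement) =====
-- stated objective: faster
-- what changed: Replace the per-candidate O(n^2) rank rescans with a parity guard plus an iterative quickselect (three-way partition around a middle pivot) that finds the k-th smallest element directly.
import Mathlib
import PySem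

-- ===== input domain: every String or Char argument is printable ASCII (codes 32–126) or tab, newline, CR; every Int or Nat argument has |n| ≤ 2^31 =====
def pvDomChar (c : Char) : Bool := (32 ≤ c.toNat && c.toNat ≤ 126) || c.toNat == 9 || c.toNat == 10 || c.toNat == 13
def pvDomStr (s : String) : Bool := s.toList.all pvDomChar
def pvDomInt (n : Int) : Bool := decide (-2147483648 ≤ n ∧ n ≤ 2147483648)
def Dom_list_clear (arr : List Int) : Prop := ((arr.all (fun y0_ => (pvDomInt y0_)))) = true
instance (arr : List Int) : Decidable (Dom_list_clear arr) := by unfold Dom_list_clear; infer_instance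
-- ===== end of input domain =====

-- B replaces A's per-candidate O(n^2) rank rescans by a parity guard plus an iterative
-- quickselect (three-way partition around a middle pivot) selecting the k-th smallest element.

-- ===== PORT A =====
-- inner `for j` loop body of A (indices produced by range are in bounds, so getD is exact)
def innerStep (arr : List Int) (i : Nat) (lr : List Int × List Int) (j : Nat) : List Int × List Int :=
  let ai := arr.getD i 0
  let aj := arr.getD j 0
  let l1 := if ai > aj then lr.1 ++ [aj] else lr.1
  let r1 := if ai < aj then lr.2 ++ [aj] else lr.2
  let l2 := if ai = aj ∧ i > j then l1 ++ [aj] else l1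
  let r2 := if ai = aj ∧ i < j then r1 ++ [aj] else r1
  (l2, r2)

-- the inner `for j` loop: builds left/right for candidate index i
def innerA (arr : List Int) (i : Nat) : List Int × List Int :=
  (List.range arr.length).foldl (innerStep arr i) ([], [])

-- the outer `for i` loop with its early return
def aLoop (arr : List Int) : List Nat → Option Int
  | [] => none
  | i :: rest =>
      let lr := innerA arr i
      if lr.1.length = lr.2.length then some (arr.getD i 0) else aLoop arr rest

def list_clear (arr : List Int) : Option Int :=
  aLoop arr (List.range arr.length)

-- ===== PORT B =====
-- membership of the pivot (an in-range getD) in its list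
theorem pv_getD_mem (l : List Int) (n : Nat) (h : n < l.length) : l.getD n 0 ∈ l := by
  rw [List.getD_eq_getElem l 0 h]; exact List.getElem_mem h

-- termination helper for selectK (the pivot fails both filters)
theorem pv_filter_len_lt {α : Type} {p : α → Bool} {xs : List α} {v : α}
    (hv : v ∈ xs) (hp : p v = false) : (xs.filter p).length < xs.length := by
  rcases Nat.lt_or_ge (xs.filter p).length xs.length with h | h
  · exact h
  · exfalso
    have hle := List.length_filter_le p xs
    have heq : (xs.filter p).length = xs.length := Nat.le_antisymm hle h
    have := (List.length_filter_eq_length_iff).1 heq v hv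
    simp [hp] at this

-- the `while True` loop of B (Python indexes xs[len(xs)//2]; xs is nonempty on entry, the
-- empty branch returning 0 is unreachable from list_clear_alt)
def selectK (xs : List Int) (k : Nat) : Int :=
  if hx : xs.length = 0 then 0
  else
    let pivot := xs.getD (xs.length / 2) 0
    let lt := xs.filter (fun x => x < pivot)
    if k < lt.length then selectK lt k
    else
      let eq := xs.count pivot
      if k < lt.length + eq then pivot
      else selectK (xs.filter (fun x => pivot < x)) (k - (lt.length + eq))
termination_by xs.length
decreasing_by
  · have h := pv_filter_len_lt (xs := xs.attach)
      (p := fun x => decide (x.1 < xs.getD (xs.length / 2) 0))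
      (v := ⟨xs.getD (xs.length / 2) 0,
        pv_getD_mem _ _ (Nat.div_lt_self (Nat.pos_of_ne_zero hx) (by norm_num : (1:Nat) < 2))⟩)
      (List.mem_attach _ _) (decide_eq_false (lt_irrefl _))
    simpa using h
  · have h := pv_filter_len_lt (xs := xs.attach)
      (p := fun x => decide (xs.getD (xs.length / 2) 0 < x.1))
      (v := ⟨xs.getD (xs.length / 2) 0,
        pv_getD_mem _ _ (Nat.div_lt_self (Nat.pos_of_ne_zero hx) (by norm_num : (1:Nat) < 2))⟩)
      (List.mem_attach _ _) (decide_eq_false (lt_irrefl _))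
    simpa using h

def list_clear_alt (arr : List Int) : Option Int :=
  if arr.length % 2 = 0 then none
  else some (selectK arr (arr.length / 2))

-- ===== PRECONDITION & SPEC =====
def Spec_list_clear (arr : List Int) (out : Option Int) : Prop := out = list_clear_alt arr
instance (arr : List Int) (out : Option Int) : Decidable (Spec_list_clear arr out) := by unfold Spec_list_clear; infer_instance

-- ===== CLAIM (what is proved, stated in full; the proofs are below) =====
def Claim_equal_list_clear : Prop := ∀ (arr : List Int), Dom_list_clear arr → Spec_list_clear arr (list_clear arr)

-- ===== LEMMAS AND PROOFS =====

-- "j strictly precedes i" in A's stable order: smaller value, or equal value and smaller index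
def pL (arr : List Int) (i j : Nat) : Bool :=
  decide (arr.getD j 0 < arr.getD i 0 ∨ (arr.getD j 0 = arr.getD i 0 ∧ j < i))

def pR (arr : List Int) (i j : Nat) : Bool :=
  decide (arr.getD i 0 < arr.getD j 0 ∨ (arr.getD i 0 = arr.getD j 0 ∧ i < j))

def rankL (arr : List Int) (i : Nat) : Nat := (List.range arr.length).countP (pL arr i)
def rankR (arr : List Int) (i : Nat) : Nat := (List.range arr.length).countP (pR arr i)

theorem countP_or_disjoint {α : Type} (p q : α → Bool) (l : List α)
    (h : ∀ x ∈ l, ¬(p x = true ∧ q x = true)) :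
    l.countP (fun x => p x || q x) = l.countP p + l.countP q := by
  induction l with
  | nil => simp
  | cons a t ih =>
      have ha := h a (by simp)
      have ht : ∀ x ∈ t, ¬(p x = true ∧ q x = true) := fun x hx => h x (by simp [hx])
      have hi := ih ht
      have hna := h a (by simp)
      cases hp : p a <;> cases hq : q a
      · simp only [List.countP_cons, hp, hq] <;> simp <;> omega
      · simp only [List.countP_cons, hp, hq] <;> simp <;> omega
      · simp only [List.countP_cons, hp, hq] <;> simp <;> omega
      · exact absurd (And.intro hp hq) hna

theorem countP_add_countP_not {α : Type} (p : α → Bool) (l : List α) :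
    l.countP p + l.countP (fun x => !(p x)) = l.length := by
  induction l with
  | nil => simp
  | cons a t ih => cases hp : p a <;> simp [List.countP_cons, hp] <;> omega

theorem countP_range_eq (n i : Nat) :
    (List.range n).countP (fun j => j == i) = if i < n then 1 else 0 := by
  have := List.count_range (a := i) (n := n)
  simpa [List.count] using this

theorem countP_range_getD (l : List Int) (p : Int → Bool) :
    (List.range l.length).countP (fun j => p (l.getD j 0)) = l.countP p := by
  induction l with
  | nil => simp
  | cons a t ih =>
      have hl : (a :: t).length = t.length + 1 := rfl
      rw [hl, List.range_succ_eq_map, List.countP_cons, List.countP_map]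
      have hc : ((fun j => p ((a :: t).getD j 0)) ∘ Nat.succ) = (fun j => p (t.getD j 0)) := by
        funext j
        show p ((a :: t).getD (j + 1) 0) = p (t.getD j 0)
        rw [List.getD_cons_succ]
      rw [hc, ih, List.countP_cons]
      simp [List.getD_cons_zero]

-- innerStep adds exactly one element to left iff pL, to right iff pR
theorem innerStep_len (arr : List Int) (i : Nat) (lr : List Int × List Int) (j : Nat) :
    (innerStep arr i lr j).1.length = lr.1.length + (if pL arr i j then 1 else 0) ∧
    (innerStep arr i lr j).2.length = lr.2.length + (if pR arr i j then 1 else 0) := by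
  simp only [innerStep, pL, pR]
  rcases lt_trichotomy (arr.getD j 0) (arr.getD i 0) with h | h | h <;>
    rcases Nat.lt_trichotomy j i with hj | hj | hj <;>
    constructor <;>
    (split_ifs <;> simp_all [List.length_append] <;> omega)

theorem innerA_len (arr : List Int) (i : Nat) :
    (innerA arr i).1.length = rankL arr i ∧ (innerA arr i).2.length = rankR arr i := by
  unfold innerA rankL rankR
  generalize List.range arr.length = ks
  suffices h : ∀ (ks : List Nat) (lr : List Int × List Int),
      (ks.foldl (innerStep arr i) lr).1.length = lr.1.length + ks.countP (pL arr i) ∧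
      (ks.foldl (innerStep arr i) lr).2.length = lr.2.length + ks.countP (pR arr i) by
    simpa using h ks ([], [])
  intro ks
  induction ks with
  | nil => simp
  | cons a t ih =>
      intro lr
      rcases innerStep_len arr i lr a with ⟨h1, h2⟩
      rcases ih (innerStep arr i lr a) with ⟨ih1, ih2⟩
      rw [List.foldl_cons]
      constructor
      · rw [ih1, h1, List.countP_cons]
        by_cases hp : pL arr i a = true <;> simp [hp] <;> omega
      · rw [ih2, h2, List.countP_cons]
        by_cases hp : pR arr i a = true <;> simp [hp] <;> omega

theorem aLoop_none (arr : List Int) (ks : List Nat)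
    (h : ∀ i ∈ ks, rankL arr i ≠ rankR arr i) : aLoop arr ks = none := by
  induction ks with
  | nil => rfl
  | cons a t ih =>
      rcases innerA_len arr a with ⟨h1, h2⟩
      simp only [aLoop, h1, h2]
      rw [if_neg (h a (by simp))]
      exact ih (fun i hi => h i (by simp [hi]))

theorem aLoop_some (arr : List Int) (ks : List Nat) (v : Int)
    (hex : ∃ i ∈ ks, rankL arr i = rankR arr i)
    (hval : ∀ i ∈ ks, rankL arr i = rankR arr i → arr.getD i 0 = v) :
    aLoop arr ks = some v := by
  induction ks with
  | nil => simp at hex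
  | cons a t ih =>
      rcases innerA_len arr a with ⟨h1, h2⟩
      simp only [aLoop, h1, h2]
      by_cases ha : rankL arr a = rankR arr a
      · rw [if_pos ha, hval a (by simp) ha]
      · rw [if_neg ha]
        rcases hex with ⟨i, hi, hc⟩
        rcases List.mem_cons.1 hi with rfl | hi'
        · exact absurd hc ha
        · exact ih ⟨i, hi', hc⟩ (fun i hi hc => hval i (by simp [hi]) hc)

-- pL is irreflexive at j = i and disjoint from pR; never both
theorem pL_pR_disjoint (arr : List Int) (i j : Nat) :
    ¬(pL arr i j = true ∧ pR arr i j = true) := by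
  simp only [pL, pR, decide_eq_true_eq]
  rintro ⟨h1 | ⟨h1, h1'⟩, h2 | ⟨h2, h2'⟩⟩ <;> omega

theorem pL_or_pR_iff_ne (arr : List Int) (i j : Nat) :
    (pL arr i j || pR arr i j) = !(j == i) := by
  simp only [pL, pR]
  by_cases hji : j = i
  · subst hji
    simp only [beq_self_eq_true, Bool.not_true, Bool.or_eq_false_iff, decide_eq_false_iff_not]
    constructor <;> omega
  · have hb : (j == i) = false := by simpa using hji
    rw [hb, Bool.not_false]
    simp only [Bool.or_eq_true, decide_eq_true_eq]
    rcases lt_trichotomy (arr.getD j 0) (arr.getD i 0) with h | h | h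
    · exact Or.inl (Or.inl h)
    · rcases Nat.lt_or_ge j i with hj | hj
      · exact Or.inl (Or.inr ⟨h, hj⟩)
      · exact Or.inr (Or.inr ⟨h.symm, by omega⟩)
    · exact Or.inr (Or.inl h)

theorem rankL_add_rankR (arr : List Int) (i : Nat) (hi : i < arr.length) :
    rankL arr i + rankR arr i + 1 = arr.length := by
  unfold rankL rankR
  have hd := countP_or_disjoint (pL arr i) (pR arr i) (List.range arr.length)
    (fun j _ => pL_pR_disjoint arr i j)
  have hc : (List.range arr.length).countP (fun j => pL arr i j || pR arr i j)
      = (List.range arr.length).countP (fun j => !(j == i)) := by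
    apply List.countP_congr
    intro j _
    rw [pL_or_pR_iff_ne arr i j]
  have hn := countP_add_countP_not (fun j => j == i) (List.range arr.length)
  rw [List.length_range] at hn
  have h1 := countP_range_eq arr.length i
  rw [if_pos hi] at h1
  omega

-- pL's transitivity gives strict monotonicity of rankL along the stable order
theorem rankL_strict (arr : List Int) (i m : Nat) (hm : m < arr.length)
    (h : pL arr i m = true) : rankL arr m < rankL arr i := by
  have key : (List.range arr.length).countP (fun j => pL arr m j || (j == m))
      ≤ (List.range arr.length).countP (pL arr i) := by
    apply List.countP_mono_left
    intro j _ hj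
    rcases Bool.or_eq_true_iff.1 hj with hj | hj
    · -- transitivity: j before m, m before i → j before i
      simp only [pL, decide_eq_true_eq] at hj h ⊢
      rcases hj with h1 | ⟨h1, h1'⟩ <;> rcases h with h2 | ⟨h2, h2'⟩
      · exact Or.inl (by omega)
      · exact Or.inl (by omega)
      · exact Or.inl (by omega)
      · exact Or.inr (by omega)
    · have : j = m := by simpa using hj
      subst this; exact h
  have hd := countP_or_disjoint (pL arr m) (fun j => j == m) (List.range arr.length)
    (by
      intro j _ hj
      rcases hj with ⟨h1, h2⟩
      have : j = m := by simpa using h2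
      subst this
      simp [pL] at h1)
  have h1 := countP_range_eq arr.length m
  rw [if_pos hm] at h1
  beta_reduce at hd
  unfold rankL
  omega

theorem rankL_lt_length (arr : List Int) (i : Nat) (hi : i < arr.length) :
    rankL arr i < arr.length := by
  have := rankL_add_rankR arr i hi
  omega

-- rankL is injective on indices below n, hence surjective onto [0, n)
theorem exists_rank_eq (arr : List Int) (k : Nat) (hk : k < arr.length) :
    ∃ i, i < arr.length ∧ rankL arr i = k := by
  set n := arr.length with hn
  have hinj : Function.Injective (fun i : Fin n => (⟨rankL arr i, rankL_lt_length arr i i.2⟩ : Fin n)) := by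
    intro i j hij
    by_contra hne
    have hij' : rankL arr i.1 = rankL arr j.1 := congrArg Fin.val hij
    have hne' : (i : Nat) ≠ (j : Nat) := fun h => hne (Fin.ext h)
    have htot : pL arr i.1 j.1 = true ∨ pL arr j.1 i.1 = true := by
      simp only [pL, decide_eq_true_eq]
      rcases lt_trichotomy (arr.getD j.1 0) (arr.getD i.1 0) with h | h | h
      · exact Or.inl (Or.inl h)
      · rcases Nat.lt_or_ge (j : Nat) i with hj | hj
        · exact Or.inl (Or.inr ⟨h, hj⟩)
        · exact Or.inr (Or.inr ⟨h.symm, by omega⟩)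
      · exact Or.inr (Or.inl h)
    rcases htot with h | h
    · have := rankL_strict arr i.1 j.1 j.2 h; omega
    · have := rankL_strict arr j.1 i.1 i.2 h; omega
  have hsurj := (Finite.injective_iff_surjective).1 hinj
  rcases hsurj ⟨k, hk⟩ with ⟨i, hi⟩
  exact ⟨i.1, i.2, congrArg Fin.val hi⟩

-- the k-th-smallest characterization: counts of strictly-smaller and of not-larger sandwich k
def IsKth (l : List Int) (k : Nat) (v : Int) : Prop :=
  l.countP (fun x => decide (x < v)) ≤ k ∧ k < l.countP (fun x => decide (x ≤ v))

theorem isKth_unique (l : List Int) (k : Nat) (v w : Int)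
    (hv : IsKth l k v) (hw : IsKth l k w) : v = w := by
  rcases hv with ⟨hv1, hv2⟩
  rcases hw with ⟨hw1, hw2⟩
  rcases lt_trichotomy v w with h | h | h
  · exfalso
    have : l.countP (fun x => decide (x ≤ v)) ≤ l.countP (fun x => decide (x < w)) :=
      List.countP_mono_left (fun x _ hx => by
        simp only [decide_eq_true_eq] at *; exact lt_of_le_of_lt hx h)
    omega
  · exact h
  · exfalso
    have : l.countP (fun x => decide (x ≤ w)) ≤ l.countP (fun x => decide (x < v)) :=
      List.countP_mono_left (fun x _ hx => by
        simp only [decide_eq_true_eq] at *; exact lt_of_le_of_lt hx h)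
    omega

-- A's accepted candidate satisfies the characterization at its rank
theorem isKth_of_rank (arr : List Int) (i : Nat) (hi : i < arr.length) :
    IsKth arr (rankL arr i) (arr.getD i 0) := by
  constructor
  · rw [← countP_range_getD arr (fun x => decide (x < arr.getD i 0))]
    exact List.countP_mono_left (fun j _ hj => by
      simp only [pL, decide_eq_true_eq] at *; exact Or.inl hj)
  · have key : (List.range arr.length).countP (fun j => pL arr i j || (j == i))
        ≤ (List.range arr.length).countP (fun j => decide (arr.getD j 0 ≤ arr.getD i 0)) := by
      apply List.countP_mono_left
      intro j _ hj
      rcases Bool.or_eq_true_iff.1 hj with hj | hj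
      · simp only [pL, decide_eq_true_eq] at *
        rcases hj with h | ⟨h, _⟩
        · exact le_of_lt h
        · exact le_of_eq h
      · have : j = i := by simpa using hj
        subst this; simp
    have hd := countP_or_disjoint (pL arr i) (fun j => j == i) (List.range arr.length)
      (by
        intro j _ hj
        rcases hj with ⟨h1, h2⟩
        have : j = i := by simpa using h2
        subst this
        simp [pL] at h1)
    have h1 := countP_range_eq arr.length i
    rw [if_pos hi] at h1
    beta_reduce at hd
    rw [← countP_range_getD arr (fun x => decide (x ≤ arr.getD i 0))]
    unfold rankL at *
    omega

-- quickselect returns a member satisfying the characterization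
theorem selectK_char : ∀ (N : Nat) (xs : List Int) (k : Nat), xs.length ≤ N → k < xs.length →
    selectK xs k ∈ xs ∧ IsKth xs k (selectK xs k) := by
  intro N
  induction N with
  | zero => intro xs k h1 h2; omega
  | succ N ih =>
      intro xs k hN hk
      have hx : xs.length ≠ 0 := by omega
      rw [selectK]
      rw [dif_neg hx]
      set pivot := xs.getD (xs.length / 2) 0 with hpiv
      have hpm : pivot ∈ xs :=
        pv_getD_mem _ _ (Nat.div_lt_self (Nat.pos_of_ne_zero hx) (by norm_num : (1:Nat) < 2))
      set lt := xs.filter (fun x => x < pivot) with hlt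
      have hltlen : lt.length = xs.countP (fun x => decide (x < pivot)) := by
        rw [hlt, ← List.countP_eq_length_filter]
      have hltxs : lt.length < xs.length := pv_filter_len_lt hpm (decide_eq_false (lt_irrefl _))
      by_cases h1 : k < lt.length
      · rw [if_pos h1]
        rcases ih lt k (by omega) h1 with ⟨hmem, hc1, hc2⟩
        set r := selectK lt k with hr
        have hrin : r ∈ xs ∧ (r < pivot) := by
          have := List.mem_filter.1 (hlt ▸ hmem)
          exact ⟨this.1, by simpa using this.2⟩
        refine ⟨hrin.1, ?_, ?_⟩
        · have : lt.countP (fun x => decide (x < r)) = xs.countP (fun x => decide (x < r)) := by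
            rw [hlt, List.countP_filter]
            apply List.countP_congr
            intro x _
            by_cases hx1 : x < r
            · simp [hx1, lt_trans hx1 hrin.2]
            · simp [hx1]
          omega
        · have : lt.countP (fun x => decide (x ≤ r)) ≤ xs.countP (fun x => decide (x ≤ r)) := by
            rw [hlt, List.countP_filter]
            apply List.countP_mono_left
            intro x _ hx1
            simpa using (Bool.and_elim_left hx1)
          omega
      · rw [if_neg h1]
        set eq := xs.count pivot with heqd
        have heq : eq = xs.countP (fun x => x == pivot) := by
          rw [heqd, List.count]
        have heqpos : 1 ≤ eq := by
          rw [heqd]; exact List.count_pos_iff.2 hpm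
        have hle_split : xs.countP (fun x => decide (x ≤ pivot)) = lt.length + eq := by
          rw [hltlen, heq, ← countP_or_disjoint]
          · apply List.countP_congr
            intro x _
            by_cases hxp : x = pivot
            · simp [hxp]
            · by_cases hxl : x < pivot <;> simp [hxp, hxl] <;> omega
          · intro x _ hx
            rcases hx with ⟨hx1, hx2⟩
            have : x = pivot := by simpa using hx2
            simp [this] at hx1
        by_cases h2 : k < lt.length + eq
        · rw [if_pos h2]
          refine ⟨hpm, ?_, ?_⟩
          · rw [← hltlen]; omega
          · rw [hle_split]; omega
        · rw [if_neg h2]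
          set gt := xs.filter (fun x => pivot < x) with hgt
          have hgtlen : gt.length = xs.countP (fun x => decide (pivot < x)) := by
            rw [hgt, ← List.countP_eq_length_filter]
          have htotal : xs.length = lt.length + eq + gt.length := by
            have h3 := countP_add_countP_not (fun x => decide (x ≤ pivot)) xs
            have h4 : xs.countP (fun x => !(decide (x ≤ pivot))) = xs.countP (fun x => decide (pivot < x)) := by
              apply List.countP_congr
              intro x _
              by_cases hx1 : x ≤ pivot <;> simp [hx1] <;> omega
            omega
          have hk' : k - (lt.length + eq) < gt.length := by omega
          rcases ih gt (k - (lt.length + eq)) (by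
            have : gt.length < xs.length := pv_filter_len_lt hpm (decide_eq_false (lt_irrefl _))
            omega) hk' with ⟨hmem, hc1, hc2⟩
          set r := selectK gt (k - (lt.length + eq)) with hr
          have hrin : r ∈ xs ∧ (pivot < r) := by
            have := List.mem_filter.1 (hgt ▸ hmem)
            exact ⟨this.1, by simpa using this.2⟩
          have hlt_split : xs.countP (fun x => decide (x < r)) = lt.length + eq + gt.countP (fun x => decide (x < r)) := by
            have hsplit : xs.countP (fun x => decide (x < r)) =
                xs.countP (fun x => decide (x ≤ pivot)) + xs.countP (fun x => decide (pivot < x) && decide (x < r)) := by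
              rw [← countP_or_disjoint]
              · apply List.countP_congr
                intro x _
                by_cases hx1 : x ≤ pivot
                · simp [hx1, lt_of_le_of_lt hx1 hrin.2]
                · simp [hx1]; omega
              · intro x _ hx
                rcases hx with ⟨hx1, hx2⟩
                simp at hx1 hx2
                omega
            rw [hsplit, hle_split, hgt, List.countP_filter]
            have : xs.countP (fun x => decide (pivot < x) && decide (x < r)) =
                xs.countP (fun a => decide (a < r) && decide (pivot < a)) := by
              apply List.countP_congr
              intro x _
              by_cases hx1 : pivot < x <;> by_cases hx2 : x < r <;> simp [hx1, hx2]
            omega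
          have hle_split2 : xs.countP (fun x => decide (x ≤ r)) = lt.length + eq + gt.countP (fun x => decide (x ≤ r)) := by
            have hsplit : xs.countP (fun x => decide (x ≤ r)) =
                xs.countP (fun x => decide (x ≤ pivot)) + xs.countP (fun x => decide (pivot < x) && decide (x ≤ r)) := by
              rw [← countP_or_disjoint]
              · apply List.countP_congr
                intro x _
                by_cases hx1 : x ≤ pivot
                · simp [hx1, le_of_lt (lt_of_le_of_lt hx1 hrin.2)]
                · simp [hx1]; omega
              · intro x _ hx
                rcases hx with ⟨hx1, hx2⟩
                simp at hx1 hx2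
                omega
            rw [hsplit, hle_split, hgt, List.countP_filter]
            have : xs.countP (fun x => decide (pivot < x) && decide (x ≤ r)) =
                xs.countP (fun a => decide (a ≤ r) && decide (pivot < a)) := by
              apply List.countP_congr
              intro x _
              by_cases hx1 : pivot < x <;> by_cases hx2 : x ≤ r <;> simp [hx1, hx2]
            omega
          refine ⟨hrin.1, ?_, ?_⟩
          · rw [hlt_split]; rcases hc1 with _; omega
          · rw [hle_split2]; rcases hc2 with _; omega

-- ===== VERDICT (by name: the statement is the Claim_ definition above) =====
theorem list_clear_spec : Claim_equal_list_clear := by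
  intro arr _
  unfold Spec_list_clear list_clear list_clear_alt
  by_cases hpar : arr.length % 2 = 0
  · rw [if_pos hpar]
    apply aLoop_none
    intro i hi hcond
    have hi' : i < arr.length := List.mem_range.1 hi
    have := rankL_add_rankR arr i hi'
    omega
  · rw [if_neg hpar]
    have hn : 0 < arr.length := by omega
    set k := arr.length / 2 with hkd
    have hk : k < arr.length := Nat.div_lt_self hn (by norm_num)
    have h2k : arr.length = 2 * k + 1 := by omega
    rcases selectK_char arr.length arr k (le_refl _) hk with ⟨_, hchar⟩
    rcases exists_rank_eq arr k hk with ⟨i0, hi0, hr0⟩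
    apply aLoop_some
    · refine ⟨i0, List.mem_range.2 hi0, ?_⟩
      have := rankL_add_rankR arr i0 hi0
      omega
    · intro i hi hcond
      have hi' : i < arr.length := List.mem_range.1 hi
      have hsum := rankL_add_rankR arr i hi'
      have hri : rankL arr i = k := by omega
      have h1 := isKth_of_rank arr i hi'
      rw [hri] at h1
      exact isKth_unique arr k _ _ h1 hchar
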